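-- pv_equiv track=rewrite | github.com/rj7hmz9cvm-lgtm/areal-neva-core | core/estimate_engine.py | _gdea_first_link
-- ===== SOURCE A (Python) =====
-- def _gdea_first_link(links: dict) -> str:
--     for l in links.values():
--         if str(l).startswith("https://docs.google.com/spreadsheets"):
--             return str(l)
--     for l in links.values():
--         if str(l).startswith("http"):
--             return str(l)
--     return ""
-- ===== SOURCE B (Python) =====
-- def _gdea_first_link(links: dict) -> str:
--     fallback = None
--     for l in links.values():
--         s = str(l)
--         if s.startswith("https://docs.google.com/spreadsheets"):
--             return s
--         if fallback is None and s.startswith("http"):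
--             fallback = s
--     return fallback if fallback is not None else ""
-- ===== Notes on version B (the rewrite author's own statement) =====
-- stated objective: alternative
-- what changed: Replaces A's two sequential scans over links.values() with a single pass that returns a spreadsheet link immediately and remembers only the first http link as a fallback.
import Mathlib
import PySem

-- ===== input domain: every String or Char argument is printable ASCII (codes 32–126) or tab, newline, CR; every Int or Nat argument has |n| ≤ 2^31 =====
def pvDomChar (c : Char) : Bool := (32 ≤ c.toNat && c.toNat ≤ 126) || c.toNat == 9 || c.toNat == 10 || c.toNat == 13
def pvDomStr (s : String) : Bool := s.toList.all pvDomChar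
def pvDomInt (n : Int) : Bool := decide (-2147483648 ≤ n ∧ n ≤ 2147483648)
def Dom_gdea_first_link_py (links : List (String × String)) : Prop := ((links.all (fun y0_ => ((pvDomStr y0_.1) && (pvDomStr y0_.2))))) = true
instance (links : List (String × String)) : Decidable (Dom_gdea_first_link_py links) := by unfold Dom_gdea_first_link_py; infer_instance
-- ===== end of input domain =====

-- B fuses A's two scans into a single pass that keeps the first http link as a fallback (same asymptotic cost, different decomposition).

-- ===== PORT A =====
-- first loop: return the first value starting with the spreadsheets prefix
def gdeaFindA (ls : List String) (pref : String) : Option String :=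
  match ls with
  | [] => none
  | s :: rest => if PySem.Str.startswith s pref then some s else gdeaFindA rest pref

def gdea_first_link_py (links : List (String × String)) : String :=
  match gdeaFindA (links.map Prod.snd) "https://docs.google.com/spreadsheets" with
  | some s => s
  | none =>
    match gdeaFindA (links.map Prod.snd) "http" with
    | some s => s
    | none => ""

-- ===== PORT B =====
-- single pass with a saved first-http fallback
def gdeaGoB (ls : List String) (fallback : Option String) : String :=
  match ls with
  | [] => match fallback with | some f => f | none => ""
  | s :: rest =>
    if PySem.Str.startswith s "https://docs.google.com/spreadsheets" then s
    else gdeaGoB rest (if fallback.isNone && PySem.Str.startswith s "http" then some s else fallback)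

def gdea_first_link_py_alt (links : List (String × String)) : String :=
  gdeaGoB (links.map Prod.snd) none

-- ===== PRECONDITION & SPEC =====
def Spec_gdea_first_link_py (links : List (String × String)) (out : String) : Prop := out = gdea_first_link_py_alt links
instance (links : List (String × String)) (out : String) : Decidable (Spec_gdea_first_link_py links out) := by unfold Spec_gdea_first_link_py; infer_instance

-- ===== CLAIM (what is proved, stated in full; the proofs are below) =====
def Claim_equal_gdea_first_link_py : Prop := ∀ (links : List (String × String)), Dom_gdea_first_link_py links → Spec_gdea_first_link_py links (gdea_first_link_py links)

-- ===== LEMMAS AND PROOFS =====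
theorem gdeaGoB_char (ls : List String) (fb : Option String) :
    gdeaGoB ls fb =
      match gdeaFindA ls "https://docs.google.com/spreadsheets" with
      | some s => s
      | none =>
        match fb with
        | some f => f
        | none => match gdeaFindA ls "http" with | some s => s | none => "" := by
  induction ls generalizing fb with
  | nil => cases fb <;> simp [gdeaGoB, gdeaFindA]
  | cons s rest ih =>
    by_cases hsp : PySem.Chars.startswith s.toList "https://docs.google.com/spreadsheets".toList
    · simp_all [gdeaGoB, gdeaFindA]
    · cases fb with
      | some f => simp_all [gdeaGoB, gdeaFindA]
      | none =>
        by_cases hh : PySem.Chars.startswith s.toList "http".toList <;>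
          simp_all [gdeaGoB, gdeaFindA]

-- ===== VERDICT (by name: the statement is the Claim_ definition above) =====
theorem gdea_first_link_py_spec : Claim_equal_gdea_first_link_py := by
  intro links _
  unfold Spec_gdea_first_link_py gdea_first_link_py gdea_first_link_py_alt
  rw [gdeaGoB_char]
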